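-- pv_equiv track=rewrite | github.com/venux021/soda | works/ita/c15/qz10.py | proc_with_dp
-- ===== SOURCE A (Python) =====
-- MIN = -0x7fffffff
--
-- def proc_with_dp(v, fee, trans_fee, capital):
--     m = len(v)
--     n = len(v[0])
--
--     dp_last = [0] * n
--     dp_cur = [0] * n
--
--     for i in range(n):
--         dp_last[i] = capital * (1 + v[0][i])
--
--     for i in range(1, m):
--         for j in range(0, n):
--             dp_cur[j] = MIN
--             for k in range(0, n):
--                 if k == j:
--                     dp_cur[j] = max(dp_cur[j], dp_last[k] - fee)
--                 else:
--                     dp_cur[j] = max(dp_cur[j], dp_last[k] - trans_fee)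
--             dp_cur[j] *= (1 + v[i][j])
--
--         t = dp_cur
--         dp_cur = dp_last
--         dp_last = t
--
--     dp_cur = dp_last
--     return max(dp_cur)
-- ===== SOURCE B (Python) =====
-- MIN = -0x7fffffff
--
-- def proc_with_dp(v, fee, trans_fee, capital):
--     # O(m*n): per row, prefix/suffix maxima of dp replace A's inner O(n) scan per cell.
--     # Preserves A's MIN floor on the pre-growth value (part of the DP's semantics).
--     n = len(v[0])
--     dp = [capital * (1 + v[0][i]) for i in range(n)]
--     for row in v[1:]:
--         pre = [None] * (n + 1)
--         for i in range(n):
--             pre[i + 1] = dp[i] if pre[i] is None else max(pre[i], dp[i])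
--         suf = [None] * (n + 1)
--         for i in range(n - 1, -1, -1):
--             suf[i] = dp[i] if suf[i + 1] is None else max(suf[i + 1], dp[i])
--         new = []
--         for j in range(n):
--             best = max(MIN, dp[j] - fee)
--             a, b = pre[j], suf[j + 1]
--             other = a if b is None else (b if a is None else max(a, b))
--             if other is not None:
--                 best = max(best, other - trans_fee)
--             new.append(best * (1 + row[j]))
--         dp = new
--     return max(dp)
-- ===== Notes on version B (the rewrite author's own statement) =====
-- stated objective: faster
-- what changed: Per dp row B precomputes prefix and suffix running maxima once, so each cell's best predecessor is an O(1) combine instead of A's O(n) inner scan over all previous columns.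
import Mathlib
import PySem

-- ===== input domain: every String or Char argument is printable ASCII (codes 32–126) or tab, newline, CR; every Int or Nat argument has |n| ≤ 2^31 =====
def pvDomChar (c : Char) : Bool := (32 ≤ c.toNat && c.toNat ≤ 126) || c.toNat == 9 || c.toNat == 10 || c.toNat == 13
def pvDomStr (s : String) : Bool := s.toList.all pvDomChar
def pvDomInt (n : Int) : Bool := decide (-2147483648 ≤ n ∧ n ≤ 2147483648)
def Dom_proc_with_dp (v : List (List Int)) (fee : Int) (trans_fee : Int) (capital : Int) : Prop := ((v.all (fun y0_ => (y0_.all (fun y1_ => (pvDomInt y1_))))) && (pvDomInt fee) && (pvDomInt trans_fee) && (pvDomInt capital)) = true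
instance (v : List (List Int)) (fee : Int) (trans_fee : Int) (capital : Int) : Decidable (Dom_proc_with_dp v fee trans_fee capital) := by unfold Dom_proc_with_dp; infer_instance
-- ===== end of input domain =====

-- B replaces A's O(n) inner scan per cell by per-row prefix/suffix maxima of the dp row
-- (O(m*n) instead of O(m*n^2)); it keeps the module constant MIN as the floor of the
-- pre-growth value, as A's DP semantics does.

-- ===== PORT A =====
def pvMIN : Int := -0x7fffffff

def proc_with_dp (v : List (List Int)) (fee : Int) (trans_fee : Int) (capital : Int) : Int :=
  let m : Int := (v.length : Int)
  let v0 : List Int := PySem.List.pyGetD v 0 []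
  let n : Int := (v0.length : Int)
  let dp0 : List Int := (PySem.List.pyRange 0 n).map (fun i => capital * (1 + PySem.List.pyGetD v0 i 0))
  let dpF : List Int := (PySem.List.pyRange 1 m).foldl (fun dp_last i =>
      let vi : List Int := PySem.List.pyGetD v i []
      (PySem.List.pyRange 0 n).map (fun j =>
        let inner : Int := (PySem.List.pyRange 0 n).foldl (fun acc k =>
            if k = j then max acc (PySem.List.pyGetD dp_last k 0 - fee)
            else max acc (PySem.List.pyGetD dp_last k 0 - trans_fee)) pvMIN
        inner * (1 + PySem.List.pyGetD vi j 0))) dp0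
  (PySem.List.max? dpF (fun x => x)).elim 0 (fun x => x)

-- ===== PORT B =====
-- prefix maxima: (preMax none dp)[i] = max of dp[:i] (none if empty), as Source B's pre
def preMax : Option Int → List Int → List (Option Int)
  | p, [] => [p]
  | p, x :: xs => p :: preMax (some (match p with | none => x | some m => max m x)) xs

-- suffix maxima: (sufMax dp)[i] = max of dp[i:] (none if empty), as Source B's suf
def sufMax : List Int → List (Option Int)
  | [] => [none]
  | x :: xs =>
    let s := sufMax xs
    (some (match s.headD none with | none => x | some m => max m x)) :: s

def proc_with_dp_alt (v : List (List Int)) (fee : Int) (trans_fee : Int) (capital : Int) : Int :=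
  let v0 : List Int := v.headD []
  let n : Nat := v0.length
  let dp0 : List Int := (List.range n).map (fun i => capital * (1 + v0.getD i 0))
  let dpF : List Int := (v.drop 1).foldl (fun dp row =>
      let pre := preMax none dp
      let suf := sufMax dp
      (List.range n).map (fun j =>
        let best : Int := max pvMIN (dp.getD j 0 - fee)
        let other : Option Int :=
          match suf.getD (j+1) none with
          | none => pre.getD j none
          | some b => match pre.getD j none with
                      | none => some b
                      | some a => some (max a b)
        let best : Int := match other with | none => best | some o => max best (o - trans_fee)
        best * (1 + row.getD j 0))) dp0
  (PySem.List.max? dpF (fun x => x)).elim 0 (fun x => x)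

-- ===== PRECONDITION & SPEC =====
-- Pre_ excludes exactly the inputs where the Python A raises: empty v or empty first row
-- (IndexError / max of empty), and a later row shorter than the first (IndexError).
def Pre_proc_with_dp (v : List (List Int)) (fee : Int) (trans_fee : Int) (capital : Int) : Prop :=
  v ≠ [] ∧ (v.headD []) ≠ [] ∧ ∀ row ∈ v, (v.headD []).length ≤ row.length
instance (v : List (List Int)) (fee : Int) (trans_fee : Int) (capital : Int) : Decidable (Pre_proc_with_dp v fee trans_fee capital) := by unfold Pre_proc_with_dp; infer_instance

def pvWitness_proc_with_dp : List (List Int) × Int × Int × Int := ([[1, 2], [3, 4]], 1, 2, 5)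

def Spec_proc_with_dp (v : List (List Int)) (fee : Int) (trans_fee : Int) (capital : Int) (out : Int) : Prop := out = proc_with_dp_alt v fee trans_fee capital
instance (v : List (List Int)) (fee : Int) (trans_fee : Int) (capital : Int) (out : Int) : Decidable (Spec_proc_with_dp v fee trans_fee capital out) := by unfold Spec_proc_with_dp; infer_instance

-- ===== CLAIM (what is proved, stated in full; the proofs are below) =====
def Claim_equal_proc_with_dp : Prop := ∀ (v : List (List Int)) (fee : Int) (trans_fee : Int) (capital : Int), Dom_proc_with_dp v fee trans_fee capital → Pre_proc_with_dp v fee trans_fee capital → Spec_proc_with_dp v fee trans_fee capital (proc_with_dp v fee trans_fee capital)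

-- ===== LEMMAS AND PROOFS =====

-- optional max accumulator (proof-side view of Source B's "None or max" updates)
def optmax (o : Option Int) (x : Int) : Option Int :=
  some (match o with | none => x | some m => max m x)

theorem optmax_swap (o : Option Int) (x y : Int) :
    optmax (optmax o x) y = optmax (optmax o y) x := by
  cases o <;> simp [optmax] <;> omega

theorem foldl_optmax_optmax (l : List Int) (o : Option Int) (x : Int) :
    l.foldl optmax (optmax o x) = optmax (l.foldl optmax o) x := by
  induction l generalizing o with
  | nil => rfl
  | cons y ys ih => rw [List.foldl_cons, List.foldl_cons, optmax_swap, ih]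

theorem preMax_getD (xs : List Int) (p : Option Int) (j : Nat) (hj : j ≤ xs.length) :
    (preMax p xs).getD j none = (xs.take j).foldl optmax p := by
  induction xs generalizing p j with
  | nil =>
    cases j with
    | zero => rfl
    | succ j => simp at hj
  | cons x xs ih =>
    cases j with
    | zero => rfl
    | succ j =>
      simp only [preMax, List.getD_cons_succ, List.take_succ_cons, List.foldl_cons]
      exact ih _ j (by simpa using hj)

theorem sufMax_head (xs : List Int) :
    (sufMax xs).headD none = xs.foldr (fun x o => optmax o x) none := by
  induction xs with
  | nil => rfl
  | cons x xs ih =>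
    simp only [sufMax, List.foldr_cons, List.headD_cons, ← ih]
    rfl

theorem sufMax_getD (xs : List Int) (i : Nat) :
    (sufMax xs).getD i none = (xs.drop i).foldr (fun x o => optmax o x) none := by
  induction xs generalizing i with
  | nil => cases i <;> simp [sufMax]
  | cons x xs ih =>
    cases i with
    | zero =>
      simp only [sufMax, List.getD_cons_zero, List.drop_zero, List.foldr_cons, optmax,
        sufMax_head]
    | succ i => simpa [sufMax] using ih i

theorem foldr_optmax_eq_foldl (l : List Int) :
    l.foldr (fun x o => optmax o x) none = l.foldl optmax none := by
  induction l with
  | nil => rfl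
  | cons x xs ih => rw [List.foldr_cons, ih, List.foldl_cons, foldl_optmax_optmax]

-- A's seeded running max, characterised by the optional max of the list
theorem foldl_max_sub (tf : Int) (l : List Int) (o : Option Int) (a : Int) :
    l.foldl (fun acc x => max acc (x - tf)) (match o with | none => a | some m => max a (m - tf))
      = (match l.foldl optmax o with | none => a | some m => max a (m - tf)) := by
  induction l generalizing o a with
  | nil => rfl
  | cons x xs ih =>
    have step : max (match o with | none => a | some m => max a (m - tf)) (x - tf)
        = (match optmax o x with | none => a | some m => max a (m - tf)) := by
      cases o with
      | none => rfl
      | some m =>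
        simp only [optmax]
        rcases le_total m x with h | h
        · rw [max_eq_right h, max_assoc, max_eq_right (show m - tf ≤ x - tf by omega)]
        · rw [max_eq_left h, max_eq_left (le_trans (show x - tf ≤ m - tf by omega) (le_max_right a (m - tf)))]
    simpa [step] using ih (optmax o x) a


-- the four-way max identity closing the per-cell case analysis
theorem max_case4 (p d mt md tf : Int) :
    max (max (max p (mt - tf)) d) (md - tf) = max (max p d) (max mt md - tf) := by
  rw [← max_sub_sub_right]
  apply le_antisymm
  · apply max_le
    · apply max_le
      · apply max_le
        · exact le_max_of_le_left (le_max_left _ _)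
        · exact le_max_of_le_right (le_max_left _ _)
      · exact le_max_of_le_left (le_max_right _ _)
    · exact le_max_of_le_right (le_max_right _ _)
  · apply max_le
    · apply max_le
      · exact le_max_of_le_left (le_max_of_le_left (le_max_left _ _))
      · exact le_max_of_le_left (le_max_right _ _)
    · apply max_le
      · exact le_max_of_le_left (le_max_of_le_left (le_max_right _ _))
      · exact le_max_right _ _

-- A's inner k-loop over one cell equals B's prefix/suffix-maxima formula for that cell
theorem inner_eq (dp : List Int) (fee tf : Int) (n j : Nat) (hn : dp.length = n) (hj : j < n) :
    (PySem.List.pyRange 0 (n : Int)).foldl (fun acc k =>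
        if k = (j : Int) then max acc (PySem.List.pyGetD dp k 0 - fee)
        else max acc (PySem.List.pyGetD dp k 0 - tf)) pvMIN
    = (match (match (sufMax dp).getD (j+1) none with
              | none => (preMax none dp).getD j none
              | some b => match (preMax none dp).getD j none with
                          | none => some b
                          | some a => some (max a b)) with
       | none => max pvMIN (dp.getD j 0 - fee)
       | some o => max (max pvMIN (dp.getD j 0 - fee)) (o - tf)) := by
  subst hn
  -- split the range at j
  rw [PySem.List.pyRange_one_append 0 (j : Int) (dp.length : Int) (by omega) (by exact_mod_cast Nat.le_of_lt hj),
      PySem.List.pyRange_one_cons (a := (j : Int)) (b := (dp.length : Int)) (by exact_mod_cast hj), List.foldl_append, List.foldl_cons,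
      if_pos rfl]
  -- prefix part: indices < j
  have hpre1 : (PySem.List.pyRange 0 (j : Int)).foldl (fun acc k =>
        if k = (j : Int) then max acc (PySem.List.pyGetD dp k 0 - fee)
        else max acc (PySem.List.pyGetD dp k 0 - tf)) pvMIN
      = (dp.take j).foldl (fun acc x => max acc (x - tf)) pvMIN := by
    rw [PySem.List.foldl_congr_mem _ _ (fun acc k => max acc (PySem.List.pyGetD (dp.take j) k 0 - tf)) pvMIN ?_]
    · have hlen : ((dp.take j).length : Int) = (j : Int) := by
        simp [List.length_take]; omega
      rw [← hlen, PySem.List.foldl_pyRange_pyGetD' (dp.take j) 0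
        (fun acc x => max acc (x - tf)) pvMIN (le_refl 0)]
      simp
    · intro acc x hx
      rw [PySem.List.mem_pyRange_one] at hx
      rw [if_neg (by omega)]
      congr 2
      have hx0 : x = ((x.toNat : Nat) : Int) := by omega
      rw [hx0, PySem.List.pyGetD_natCast, PySem.List.pyGetD_natCast]
      have : x.toNat < j := by omega
      simp [List.getD, this]
  -- suffix part: indices > j
  have hsuf1 : ∀ (a0 : Int), (PySem.List.pyRange ((j : Int) + 1) (dp.length : Int)).foldl (fun acc k =>
        if k = (j : Int) then max acc (PySem.List.pyGetD dp k 0 - fee)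
        else max acc (PySem.List.pyGetD dp k 0 - tf)) a0
      = (dp.drop (j + 1)).foldl (fun acc x => max acc (x - tf)) a0 := by
    intro a0
    rw [PySem.List.foldl_congr_mem _ _ (fun acc k => max acc (PySem.List.pyGetD dp k 0 - tf)) a0 ?_]
    · rw [PySem.List.foldl_pyRange_pyGetD' dp 0 (fun acc x => max acc (x - tf)) a0 (by omega)]
      rw [show ((j : Int) + 1).toNat = j + 1 by omega]
    · intro acc x hx
      rw [PySem.List.mem_pyRange_one] at hx
      rw [if_neg (by omega)]
  rw [hpre1, hsuf1]
  -- characterise both running maxima by optional maxima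
  have e1 := foldl_max_sub tf (dp.take j) none pvMIN
  rw [show PySem.List.pyGetD dp (j : Int) 0 = dp.getD j 0 from PySem.List.pyGetD_natCast dp j 0]
  rw [e1]
  have e2 := foldl_max_sub tf (dp.drop (j + 1)) none
  rw [preMax_getD dp none j (by omega), sufMax_getD dp (j + 1), foldr_optmax_eq_foldl]
  cases hmt : (dp.take j).foldl optmax none with
  | none =>
    rw [e2 (max pvMIN (dp.getD j 0 - fee))]
    cases (dp.drop (j + 1)).foldl optmax none <;> rfl
  | some mt =>
    rw [e2 (max (max pvMIN (mt - tf)) (dp.getD j 0 - fee))]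
    cases (dp.drop (j + 1)).foldl optmax none with
    | none => exact max_right_comm pvMIN (mt - tf) (dp.getD j 0 - fee)
    | some md => exact max_case4 pvMIN (dp.getD j 0 - fee) mt md tf

-- one outer-loop step of A equals one step of B, for a dp row of length n
theorem step_eq (n : Nat) (fee tf : Int) (dp row : List Int) (h : dp.length = n) :
    (PySem.List.pyRange 0 (n : Int)).map (fun j =>
        ((PySem.List.pyRange 0 (n : Int)).foldl (fun acc k =>
            if k = j then max acc (PySem.List.pyGetD dp k 0 - fee)
            else max acc (PySem.List.pyGetD dp k 0 - tf)) pvMIN) * (1 + PySem.List.pyGetD row j 0))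
    = (List.range n).map (fun j =>
        (match (match (sufMax dp).getD (j+1) none with
                | none => (preMax none dp).getD j none
                | some b => match (preMax none dp).getD j none with
                            | none => some b
                            | some a => some (max a b)) with
         | none => max pvMIN (dp.getD j 0 - fee)
         | some o => max (max pvMIN (dp.getD j 0 - fee)) (o - tf)) * (1 + row.getD j 0)) := by
  rw [PySem.List.pyRange_zero_nat, List.map_map]
  apply List.map_congr_left
  intro j hj
  simp only [Function.comp]
  rw [← PySem.List.pyRange_zero_nat, inner_eq dp fee tf n j h (List.mem_range.mp hj),
    PySem.List.pyGetD_natCast]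

-- folding A's row step over the remaining rows equals folding B's row step
theorem rows_fold_eq (n : Nat) (fee tf : Int) (rows : List (List Int)) (dp : List Int) (h : dp.length = n) :
    rows.foldl (fun dp_last row =>
      (PySem.List.pyRange 0 (n : Int)).map (fun j =>
        ((PySem.List.pyRange 0 (n : Int)).foldl (fun acc k =>
            if k = j then max acc (PySem.List.pyGetD dp_last k 0 - fee)
            else max acc (PySem.List.pyGetD dp_last k 0 - tf)) pvMIN) * (1 + PySem.List.pyGetD row j 0))) dp
    = rows.foldl (fun dp row =>
        (List.range n).map (fun j =>
          (match (match (sufMax dp).getD (j+1) none with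
                  | none => (preMax none dp).getD j none
                  | some b => match (preMax none dp).getD j none with
                              | none => some b
                              | some a => some (max a b)) with
           | none => max pvMIN (dp.getD j 0 - fee)
           | some o => max (max pvMIN (dp.getD j 0 - fee)) (o - tf)) * (1 + row.getD j 0))) dp := by
  induction rows generalizing dp with
  | nil => rfl
  | cons r rs ih =>
    rw [List.foldl_cons, List.foldl_cons, step_eq n fee tf dp r h]
    exact ih _ (by simp)

-- ===== VERDICT (by name: the statement is the Claim_ definition above) =====
theorem proc_with_dp_spec : Claim_equal_proc_with_dp := by
  intro v fee tf cap _ _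
  unfold Spec_proc_with_dp proc_with_dp proc_with_dp_alt
  simp only []
  rw [show PySem.List.pyGetD v 0 [] = v.headD [] by
        rw [PySem.List.pyGetD_zero]; cases v <;> rfl]
  rw [show ((PySem.List.pyRange 0 ((v.headD []).length : Int)).map
        (fun i => cap * (1 + PySem.List.pyGetD (v.headD []) i 0)))
      = ((List.range (v.headD []).length).map (fun i => cap * (1 + (v.headD []).getD i 0))) by
        rw [PySem.List.pyRange_zero_nat, List.map_map]
        apply List.map_congr_left
        intro i _
        simp only [Function.comp, PySem.List.pyGetD_natCast]]
  rw [PySem.List.foldl_pyRange_pyGetD' v []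
      (fun dp_last vi =>
        (PySem.List.pyRange 0 ((v.headD []).length : Int)).map (fun j =>
          ((PySem.List.pyRange 0 ((v.headD []).length : Int)).foldl (fun acc k =>
              if k = j then max acc (PySem.List.pyGetD dp_last k 0 - fee)
              else max acc (PySem.List.pyGetD dp_last k 0 - tf)) pvMIN) * (1 + PySem.List.pyGetD vi j 0)))
      ((List.range (v.headD []).length).map (fun i => cap * (1 + (v.headD []).getD i 0)))
      (by omega : (0:Int) ≤ 1)]
  rw [rows_fold_eq (v.headD []).length fee tf (v.drop (1:Int).toNat)
      ((List.range (v.headD []).length).map (fun i => cap * (1 + (v.headD []).getD i 0))) (by simp)]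
  rfl
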